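-- pv_equiv track=rewrite | github.com/Libensemble/libensemble | libensemble/resources/resources.py | get_group_list
-- ===== SOURCE A (Python) =====
-- def get_group_list(split_list):
--     group = 1
--     group_list = []
--     node = split_list[0]
--
--     # SH What to do when multiple nodes in each entry........ what is group then.
--     for i in range(len(split_list)):
--         if split_list[i] == node:
--             group_list.append(group)
--         else:
--             node = split_list[i]
--             group += 1
--             group_list.append(group)
--     return group_list
-- ===== SOURCE B (Python) =====
-- def get_group_list(split_list):
--     n = len(split_list)
--     result = []
--     gid = 0
--     i = 0
--     while i < n:
--         gid += 1
--         run = 1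
--         while i + run < n and split_list[i + run] == split_list[i]:
--             run += 1
--         result.extend([gid] * run)
--         i += run
--     return result
-- ===== Notes on version B (the rewrite author's own statement) =====
-- stated objective: alternative
-- what changed: B detects each maximal run of equal values with a two-pointer scan and extends the output with the run's group id once per run, instead of A's per-element loop carrying a 'current node' and an equality-guarded group counter; B also returns [] on empty input where A raises.
-- outside the precondition, e.g. on get_group_list([]): A raises IndexError, B returns []
import Mathlib
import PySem

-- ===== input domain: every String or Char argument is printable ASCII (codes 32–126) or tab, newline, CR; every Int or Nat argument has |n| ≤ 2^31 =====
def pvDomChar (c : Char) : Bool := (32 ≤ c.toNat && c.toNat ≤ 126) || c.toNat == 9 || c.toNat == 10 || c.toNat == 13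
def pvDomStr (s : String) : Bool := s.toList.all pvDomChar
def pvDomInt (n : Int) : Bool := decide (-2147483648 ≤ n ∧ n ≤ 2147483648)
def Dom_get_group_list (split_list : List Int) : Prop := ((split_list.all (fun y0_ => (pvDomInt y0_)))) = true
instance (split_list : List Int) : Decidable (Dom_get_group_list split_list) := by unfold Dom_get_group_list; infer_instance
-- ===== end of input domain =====

-- B replaces A's per-element equality-guarded accumulator with a two-pointer scan
-- over maximal runs of equal values (one extend per run); return-value equivalence on nonempty lists.


-- ===== PORT A =====
-- split_list[0] raises IndexError on []; Pre_ excludes the empty list, so getD is exact here.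
def get_group_list (split_list : List Int) : List Int :=
  let node := PySem.List.pyGetD split_list 0 0
  let s := (PySem.List.pyRange 0 (split_list.length : Int) 1).foldl
    (fun (st : Int × Int × List Int) i =>
      if PySem.List.pyGetD split_list i 0 = st.2.1 then
        (st.1, st.2.1, st.2.2 ++ [st.1])
      else
        (st.1 + 1, PySem.List.pyGetD split_list i 0, st.2.2 ++ [st.1 + 1]))
    (1, node, ([] : List Int))
  s.2.2

-- ===== PORT B =====
-- inner while loop: extend the current run while split_list[i+run] == split_list[i]
def runLenB (xs : List Int) (n i run : Nat) : Nat :=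
  if h : i + run < n ∧ xs.getD (i + run) 0 = xs.getD i 0 then
    runLenB xs n i (run + 1)
  else run
termination_by n - (i + run)
decreasing_by omega

theorem runLenB_ge (xs : List Int) (n i run : Nat) : run ≤ runLenB xs n i run := by
  induction hd : n - (i + run) generalizing run with
  | zero =>
    unfold runLenB; split
    · omega
    · exact Nat.le_refl _
  | succ d ih =>
    unfold runLenB; split
    · exact Nat.le_of_succ_le (ih (run + 1) (by omega))
    · exact Nat.le_refl _

-- outer while loop over run starts
def goB (xs : List Int) (n i : Nat) (gid : Int) (acc : List Int) : List Int :=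
  if _h : i < n then
    let run := runLenB xs n i 1
    goB xs n (i + run) (gid + 1) (acc ++ List.replicate run (gid + 1))
  else acc
termination_by n - i
decreasing_by have := runLenB_ge xs n i 1; omega

def get_group_list_alt (split_list : List Int) : List Int :=
  goB split_list split_list.length 0 0 []

-- ===== PRECONDITION & SPEC =====
-- Pre_ excludes only the empty list, on which A raises IndexError at split_list[0].
def Pre_get_group_list (split_list : List Int) : Prop := split_list ≠ []
instance (split_list : List Int) : Decidable (Pre_get_group_list split_list) := by
  unfold Pre_get_group_list; infer_instance

def pvWitness_get_group_list : List Int := [7, 7, 3, 3, 3, 7]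

def Spec_get_group_list (split_list : List Int) (out : List Int) : Prop :=
  out = get_group_list_alt split_list
instance (split_list : List Int) (out : List Int) : Decidable (Spec_get_group_list split_list out) := by
  unfold Spec_get_group_list; infer_instance

-- ===== CLAIM (what is proved, stated in full; the proofs are below) =====
def Claim_equal_get_group_list : Prop := ∀ (split_list : List Int), Dom_get_group_list split_list → Pre_get_group_list split_list → Spec_get_group_list split_list (get_group_list split_list)

-- ===== LEMMAS AND PROOFS =====

-- structural reading of A's loop body
def specF : Int → Int → List Int → List Int
  | _, _, [] => []
  | g, node, x :: rest =>
    if x = node then g :: specF g node rest else (g + 1) :: specF (g + 1) x rest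

-- length of the leading run of x's
def leadRun (x : Int) : List Int → Nat
  | [] => 0
  | y :: rest => if y = x then leadRun x rest + 1 else 0

-- run-level spec both ports reduce to
def runsSpec : Int → List Int → List Int
  | _, [] => []
  | g, x :: rest =>
    List.replicate (leadRun x rest + 1) (g + 1) ++
      runsSpec (g + 1) (rest.drop (leadRun x rest))
termination_by _ l => l.length
decreasing_by simp

theorem runsSpec_nil (g : Int) : runsSpec g [] = [] := runsSpec.eq_1 g

theorem runsSpec_cons (g x : Int) (rest : List Int) :
    runsSpec g (x :: rest) =
      List.replicate (leadRun x rest + 1) (g + 1) ++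
        runsSpec (g + 1) (rest.drop (leadRun x rest)) := runsSpec.eq_2 g x rest

theorem leadRun_le (x : Int) (ys : List Int) : leadRun x ys ≤ ys.length := by
  induction ys with
  | nil => simp [leadRun]
  | cons y rest ih =>
    simp only [leadRun]
    split
    · simpa using ih
    · simp

theorem specF_absorb (x : Int) (ys : List Int) (g : Int) :
    specF g x ys = List.replicate (leadRun x ys) g ++ specF g x (ys.drop (leadRun x ys)) := by
  induction ys generalizing g with
  | nil => simp [leadRun, specF]
  | cons y rest ih =>
    by_cases h : y = x
    · subst h
      simp [specF, leadRun, List.replicate_succ, ih]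
    · simp [specF, leadRun, h]

theorem drop_leadRun (x : Int) (ys : List Int) :
    ys.drop (leadRun x ys) = [] ∨
      ∃ y rest, ys.drop (leadRun x ys) = y :: rest ∧ y ≠ x := by
  induction ys with
  | nil => simp [leadRun]
  | cons y rest ih =>
    by_cases h : y = x
    · subst h; simpa [leadRun] using ih
    · right; exact ⟨y, rest, by simp [leadRun, h], h⟩

theorem specF_eq_runsSpec (n : Nat) (ys : List Int) (g x : Int) (hn : ys.length ≤ n) :
    specF (g + 1) x (x :: ys) = runsSpec g (x :: ys) := by
  induction n generalizing ys g x with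
  | zero =>
    have : ys = [] := by cases ys <;> simp_all
    subst this
    rw [runsSpec_cons]
    simp [specF, leadRun, List.replicate, runsSpec_nil]
  | succ n ih =>
    have h1 : specF (g + 1) x (x :: ys) = (g + 1) :: specF (g + 1) x ys := by
      simp [specF]
    rw [h1, specF_absorb x ys (g + 1)]
    rw [runsSpec_cons]
    simp only [List.replicate_succ, List.cons_append]
    congr 1
    congr 1
    -- remaining: specF (g+1) x zs = runsSpec (g+1) zs where zs heads with ≠ x
    rcases drop_leadRun x ys with hz | ⟨y, rest, hz, hyx⟩
    · rw [hz]; simp [specF, runsSpec_nil]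
    · rw [hz]
      have hlen : rest.length ≤ n := by
        have h2 : (ys.drop (leadRun x ys)).length = ys.length - leadRun x ys :=
          List.length_drop
        rw [hz] at h2
        simp at h2
        omega
      have : specF (g + 1) x (y :: rest) = specF (g + 1 + 1) y (y :: rest) := by
        simp [specF, hyx]
      rw [this, ih rest (g + 1) y hlen]

-- A-side: the element fold computes specF
theorem foldA (ys : List Int) (g node : Int) (acc : List Int) :
    (ys.foldl
      (fun (st : Int × Int × List Int) x =>
        if x = st.2.1 then (st.1, st.2.1, st.2.2 ++ [st.1])
        else (st.1 + 1, x, st.2.2 ++ [st.1 + 1]))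
      (g, node, acc)).2.2 = acc ++ specF g node ys := by
  induction ys generalizing g node acc with
  | nil => simp [specF]
  | cons y rest ih =>
    by_cases h : y = node
    · simp [specF, h, List.foldl_cons, ih]
    · simp [specF, h, List.foldl_cons, ih]

-- B-side: the inner loop computes leadRun
theorem runLenB_eq (xs : List Int) (i run : Nat) :
    runLenB xs xs.length i run = run + leadRun (xs.getD i 0) (xs.drop (i + run)) := by
  induction hd : xs.length - (i + run) generalizing run with
  | zero =>
    unfold runLenB
    have hge : xs.length ≤ i + run := by omega
    rw [List.drop_eq_nil_of_le hge]
    simp [leadRun]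
    omega
  | succ d ih =>
    unfold runLenB
    have hlt : i + run < xs.length := by omega
    have hdrop : xs.drop (i + run) = xs.getD (i + run) 0 :: xs.drop (i + run + 1) := by
      rw [List.drop_eq_getElem_cons hlt, List.getD_eq_getElem xs 0 hlt]
    split
    · rename_i hcond
      rw [ih (run + 1) (by omega)]
      rw [hdrop, leadRun, if_pos hcond.2]
      have : i + (run + 1) = i + run + 1 := by omega
      rw [this]
      omega
    · rename_i hcond
      push Not at hcond
      rw [hdrop, leadRun, if_neg (hcond hlt)]
      omega

-- B-side: the outer loop computes runsSpec of the remaining suffix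
theorem goB_eq (xs : List Int) (i : Nat) (g : Int) (acc : List Int) :
    goB xs xs.length i g acc = acc ++ runsSpec g (xs.drop i) := by
  induction hd : xs.length - i using Nat.strong_induction_on generalizing i g acc with
  | _ d ih =>
    unfold goB
    split
    · rename_i hlt
      have hdrop : xs.drop i = xs.getD i 0 :: xs.drop (i + 1) := by
        rw [List.drop_eq_getElem_cons hlt, List.getD_eq_getElem xs 0 hlt]
      have hrun : runLenB xs xs.length i 1 = 1 + leadRun (xs.getD i 0) (xs.drop (i + 1)) :=
        runLenB_eq xs i 1
      have hge : 1 ≤ runLenB xs xs.length i 1 := runLenB_ge xs xs.length i 1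
      rw [ih (xs.length - (i + runLenB xs xs.length i 1)) (by omega) _ _ _ rfl]
      rw [hdrop, runsSpec_cons]
      rw [List.append_assoc]
      congr 1
      have hk : leadRun (xs.getD i 0) (xs.drop (i + 1)) ≤ (xs.drop (i + 1)).length :=
        leadRun_le _ _
      congr 1
      · rw [hrun, Nat.add_comm]
      · rw [hrun, List.drop_drop]
        have harith : i + (1 + leadRun (xs.getD i 0) (xs.drop (i + 1))) =
            leadRun (xs.getD i 0) (xs.drop (i + 1)) + (i + 1) := by omega
        rw [harith]
        exact congrArg (fun k => runsSpec (g + 1) (List.drop k xs)) (by omega)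
    · rename_i hge
      rw [List.drop_eq_nil_of_le (by omega), runsSpec_nil]
      simp

-- ===== VERDICT (by name: the statement is the Claim_ definition above) =====
theorem get_group_list_spec : Claim_equal_get_group_list := by
  intro xs _ hpre
  unfold Spec_get_group_list get_group_list get_group_list_alt
  rcases List.exists_cons_of_ne_nil hpre with ⟨x, rest, hx⟩
  show ((PySem.List.pyRange 0 (xs.length : Int) 1).foldl
      (fun (st : Int × Int × List Int) i =>
        if PySem.List.pyGetD xs i 0 = st.2.1 then (st.1, st.2.1, st.2.2 ++ [st.1])
        else (st.1 + 1, PySem.List.pyGetD xs i 0, st.2.2 ++ [st.1 + 1]))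
      (1, PySem.List.pyGetD xs 0 0, ([] : List Int))).2.2
    = goB xs xs.length 0 0 []
  rw [PySem.List.foldl_pyRange_zero_pyGetD' xs 0
      (fun (st : Int × Int × List Int) v =>
        if v = st.2.1 then (st.1, st.2.1, st.2.2 ++ [st.1])
        else (st.1 + 1, v, st.2.2 ++ [st.1 + 1]))
      (1, PySem.List.pyGetD xs 0 0, ([] : List Int))]
  rw [goB_eq xs 0 0 []]
  simp only [List.drop_zero, List.nil_append]
  rw [show PySem.List.pyGetD xs 0 0 = x by
    simp [hx, PySem.List.pyGetD, PySem.List.pyGet?, PySem.List.pyIdx?]]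
  rw [hx, foldA (x :: rest) 1 x []]
  have h := specF_eq_runsSpec rest.length rest 0 x (le_refl _)
  simpa using h
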